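-- pv_equiv track=rewrite | github.com/polaires/Banta_Lab_RFdiffusion | backend/serverless/design_validation_pipeline.py | _detect_design_type
-- ===== SOURCE A (Python) =====
-- from typing import Dict, Any, Optional, List, Tuple
--
-- def _detect_design_type(
--
--     pdb_content: str,
--     ligand_name: Optional[str],
--     metal_type: Optional[str],
-- ) -> str:
--     """Detect design type from PDB content and parameters."""
--     has_metal = metal_type is not None
--     has_ligand = ligand_name is not None
--
--     # Also check PDB for HETATM records
--     if not has_metal:
--         for line in pdb_content.split("\n"):
--             if line.startswith("HETATM"):
--                 res_name = line[17:20].strip()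
--                 # Common metal codes
--                 if res_name in ["ZN", "MG", "CA", "FE", "CU", "MN", "CO", "NI",
--                                 "TB", "EU", "DY", "GD", "SM", "ND", "LA", "CE"]:
--                     has_metal = True
--                     break
--
--     if not has_ligand:
--         for line in pdb_content.split("\n"):
--             if line.startswith("HETATM"):
--                 res_name = line[17:20].strip()
--                 # Skip waters, metals, common ions
--                 if res_name not in ["HOH", "WAT", "ZN", "MG", "CA", "FE", "CU",
--                                     "MN", "CO", "NI", "TB", "EU", "DY", "GD",
--                                     "SM", "ND", "LA", "CE", "NA", "CL", "K"]:
--                     has_ligand = True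
--                     break
--
--     if has_metal and has_ligand:
--         return "metal_ligand_complex"
--     elif has_metal:
--         return "metal_binding"
--     elif has_ligand:
--         return "ligand_binding"
--     else:
--         return "protein_only"
-- ===== SOURCE B (Python) =====
-- from typing import Optional
--
-- METALS = {"ZN", "MG", "CA", "FE", "CU", "MN", "CO", "NI",
--           "TB", "EU", "DY", "GD", "SM", "ND", "LA", "CE"}
-- SKIP = METALS | {"HOH", "WAT", "NA", "CL", "K"}
--
--
-- def _detect_design_type(
--     pdb_content: str,
--     ligand_name: Optional[str],
--     metal_type: Optional[str],
-- ) -> str: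
--     """Detect design type from PDB content and parameters (single pass)."""
--     has_metal = metal_type is not None
--     has_ligand = ligand_name is not None
--     for line in pdb_content.split("\n"):
--         if has_metal and has_ligand:
--             break
--         if not line.startswith("HETATM"):
--             continue
--         res_name = line[17:20].strip()
--         if not has_metal and res_name in METALS:
--             has_metal = True
--         if not has_ligand and res_name not in SKIP:
--             has_ligand = True
--     if has_metal and has_ligand:
--         return "metal_ligand_complex"
--     if has_metal:
--         return "metal_binding"
--     if has_ligand:
--         return "ligand_binding"
--     return "protein_only"
-- ===== Notes on version B (the rewrite author's own statement) =====
-- stated objective: simpler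
-- what changed: Replaces A's two sequential scans of the split PDB lines (one for metals, one for ligands) with a single pass that maintains both flags at once, using fixed METALS and SKIP constant sets and breaking as soon as both flags are set.
import Mathlib
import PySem

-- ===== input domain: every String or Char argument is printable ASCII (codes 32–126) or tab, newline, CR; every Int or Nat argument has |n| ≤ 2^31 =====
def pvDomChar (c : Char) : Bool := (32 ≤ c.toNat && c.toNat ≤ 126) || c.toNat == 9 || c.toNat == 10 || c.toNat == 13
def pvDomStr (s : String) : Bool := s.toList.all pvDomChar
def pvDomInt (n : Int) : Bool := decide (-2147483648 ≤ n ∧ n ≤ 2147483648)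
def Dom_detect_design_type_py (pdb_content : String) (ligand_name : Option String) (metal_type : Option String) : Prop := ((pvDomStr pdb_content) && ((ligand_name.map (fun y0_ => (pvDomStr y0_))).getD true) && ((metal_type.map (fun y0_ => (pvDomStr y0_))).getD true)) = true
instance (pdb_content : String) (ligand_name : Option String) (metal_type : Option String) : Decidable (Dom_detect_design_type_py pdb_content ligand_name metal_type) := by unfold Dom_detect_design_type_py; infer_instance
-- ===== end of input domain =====

-- B replaces A's two sequential scans of the lines by a single pass keeping both flags; same result, no speed claim.

-- ===== PORT A =====
-- A: two separate guarded loops over the split lines, each with its inline literal list; loop-with-break ported as a foldl on the flag.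
def detect_design_type_py (pdb_content : String) (ligand_name : Option String) (metal_type : Option String) : String :=
  let lines := (PySem.Str.split? pdb_content "\n").getD []
  let has_metal :=
    if metal_type.isSome then true
    else
      lines.foldl (fun hm line =>
        if hm then hm
        else if PySem.Str.startswith line "HETATM" then
          let res_name := PySem.Str.strip (PySem.Str.slice line (some 17) (some 20))
          if ["ZN", "MG", "CA", "FE", "CU", "MN", "CO", "NI",
              "TB", "EU", "DY", "GD", "SM", "ND", "LA", "CE"].contains res_name then true
          else hm
        else hm) false
  let has_ligand :=
    if ligand_name.isSome then true
    else
      lines.foldl (fun hl line =>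
        if hl then hl
        else if PySem.Str.startswith line "HETATM" then
          let res_name := PySem.Str.strip (PySem.Str.slice line (some 17) (some 20))
          if !(["HOH", "WAT", "ZN", "MG", "CA", "FE", "CU",
                "MN", "CO", "NI", "TB", "EU", "DY", "GD",
                "SM", "ND", "LA", "CE", "NA", "CL", "K"].contains res_name) then true
          else hl
        else hl) false
  if has_metal && has_ligand then "metal_ligand_complex"
  else if has_metal then "metal_binding"
  else if has_ligand then "ligand_binding"
  else "protein_only"

-- ===== PORT B =====
def pvMETALS : List String :=
  ["ZN", "MG", "CA", "FE", "CU", "MN", "CO", "NI",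
   "TB", "EU", "DY", "GD", "SM", "ND", "LA", "CE"]
def pvSKIP : List String := pvMETALS ++ ["HOH", "WAT", "NA", "CL", "K"]

def pvResName (line : String) : String :=
  PySem.Str.strip (PySem.Str.slice line (some 17) (some 20))

-- B's single loop with break: one recursion over the lines carrying both flags.
def pvScan : List String → Bool → Bool → Bool × Bool
  | [], hm, hl => (hm, hl)
  | line :: rest, hm, hl =>
    if hm && hl then (hm, hl)
    else if PySem.Str.startswith line "HETATM" then
      let r := pvResName line
      pvScan rest (hm || pvMETALS.contains r) (hl || !(pvSKIP.contains r))
    else pvScan rest hm hl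

def detect_design_type_py_alt (pdb_content : String) (ligand_name : Option String) (metal_type : Option String) : String :=
  let p := pvScan ((PySem.Str.split? pdb_content "\n").getD []) metal_type.isSome ligand_name.isSome
  if p.1 && p.2 then "metal_ligand_complex"
  else if p.1 then "metal_binding"
  else if p.2 then "ligand_binding"
  else "protein_only"

-- ===== PRECONDITION & SPEC =====
def Spec_detect_design_type_py (pdb_content : String) (ligand_name : Option String) (metal_type : Option String) (out : String) : Prop := out = detect_design_type_py_alt pdb_content ligand_name metal_type
instance (pdb_content : String) (ligand_name : Option String) (metal_type : Option String) (out : String) : Decidable (Spec_detect_design_type_py pdb_content ligand_name metal_type out) := by unfold Spec_detect_design_type_py; infer_instance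

-- ===== CLAIM (what is proved, stated in full; the proofs are below) =====
def Claim_equal_detect_design_type_py : Prop := ∀ (pdb_content : String) (ligand_name : Option String) (metal_type : Option String), Dom_detect_design_type_py pdb_content ligand_name metal_type → Spec_detect_design_type_py pdb_content ligand_name metal_type (detect_design_type_py pdb_content ligand_name metal_type)

-- ===== LEMMAS AND PROOFS =====

-- A's guarded loop-with-break on one flag computes "initial flag or some line fires".
theorem foldFlag (g : String → Bool) (ls : List String) (b : Bool) :
    ls.foldl (fun hm line =>
      if hm then hm
      else if PySem.Str.startswith line "HETATM" then
        (if g line then true else hm)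
      else hm) b
    = (b || ls.any (fun l => PySem.Str.startswith l "HETATM" && g l)) := by
  induction ls generalizing b with
  | nil => simp
  | cons l ls ih =>
    simp only [List.foldl_cons, List.any_cons, ih]
    cases b <;> cases hs : PySem.Str.startswith l "HETATM" <;>
      cases hg : g l <;> simp

-- B's single pass computes both "or"s at once.
theorem scan_eq (ls : List String) (hm hl : Bool) :
    pvScan ls hm hl =
      (hm || ls.any (fun l => PySem.Str.startswith l "HETATM" && pvMETALS.contains (pvResName l)),
       hl || ls.any (fun l => PySem.Str.startswith l "HETATM" && !(pvSKIP.contains (pvResName l)))) := by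
  induction ls generalizing hm hl with
  | nil => simp [pvScan]
  | cons l ls ih =>
    simp only [pvScan, List.any_cons]
    by_cases hb : hm && hl
    · obtain ⟨h1, h2⟩ := Bool.and_eq_true_iff.mp hb
      simp [h1, h2]
    · cases hs : PySem.Str.startswith l "HETATM" <;>
        simp [hb, ih, Bool.or_assoc]

-- A's ligand skip list and B's pvSKIP hold the same strings (B groups metals first), so membership agrees.
theorem skip_contains (s : String) :
    (["HOH", "WAT", "ZN", "MG", "CA", "FE", "CU",
      "MN", "CO", "NI", "TB", "EU", "DY", "GD",
      "SM", "ND", "LA", "CE", "NA", "CL", "K"] : List String).contains s = pvSKIP.contains s := by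
  simp only [List.contains_eq_mem, decide_eq_decide, pvSKIP, pvMETALS, List.mem_append,
    List.mem_cons, List.not_mem_nil]
  tauto

-- ===== VERDICT (by name: the statement is the Claim_ definition above) =====
theorem detect_design_type_py_spec : Claim_equal_detect_design_type_py := by
  intro pdb_content ligand_name metal_type _
  unfold Spec_detect_design_type_py detect_design_type_py detect_design_type_py_alt
  simp only [scan_eq, foldFlag, Bool.false_or, skip_contains, pvResName, pvMETALS]
  cases metal_type.isSome <;> cases ligand_name.isSome <;> simp
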